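-- pv_equiv track=rewrite | github.com/Shadowgar/hypertrophyapp | packages/core-engine/core_engine/decision_progression.py | _tradeoff_risk_level
-- ===== SOURCE A (Python) =====
-- def _tradeoff_risk_level(delta_by_muscle: dict[str, int]) -> str:
--     steep_losses = [delta for delta in delta_by_muscle.values() if delta <= -3]
--     moderate_losses = [delta for delta in delta_by_muscle.values() if -3 < delta <= -1]
--     if steep_losses:
--         return "high"
--     if moderate_losses:
--         return "medium"
--     return "low"
-- ===== SOURCE B (Python) =====
-- def _tradeoff_risk_level(delta_by_muscle: dict[str, int]) -> str:
--     worst = min(delta_by_muscle.values(), default=0)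
--     if worst <= -3:
--         return "high"
--     if worst <= -1:
--         return "medium"
--     return "low"
-- ===== Notes on version B (the rewrite author's own statement) =====
-- stated objective: simpler
-- what changed: Replaces the two filtered list-comprehensions and emptiness tests with a single min-reduction over the values (default 0) followed by two threshold comparisons.
import Mathlib
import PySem

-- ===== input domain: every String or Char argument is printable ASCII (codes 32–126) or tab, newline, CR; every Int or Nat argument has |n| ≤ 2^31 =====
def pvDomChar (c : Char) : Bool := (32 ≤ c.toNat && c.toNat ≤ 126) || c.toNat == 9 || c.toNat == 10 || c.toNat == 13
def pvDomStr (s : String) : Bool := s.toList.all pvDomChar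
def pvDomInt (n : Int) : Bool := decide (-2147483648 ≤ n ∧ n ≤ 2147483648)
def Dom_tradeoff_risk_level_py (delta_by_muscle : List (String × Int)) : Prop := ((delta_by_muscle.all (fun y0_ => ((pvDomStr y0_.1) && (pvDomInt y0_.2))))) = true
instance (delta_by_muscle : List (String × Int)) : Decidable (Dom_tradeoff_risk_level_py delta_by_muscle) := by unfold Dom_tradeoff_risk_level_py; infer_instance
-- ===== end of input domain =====

-- B replaces A's two filtered list-comprehensions with one min-reduction plus threshold tests (simpler).
-- ===== PORT A =====
def tradeoff_risk_level_py (delta_by_muscle : List (String × Int)) : String :=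
  let vals := (PySem.Dict.ofList delta_by_muscle).values
  let steep_losses := vals.filter (fun delta => decide (delta ≤ -3))
  let moderate_losses := vals.filter (fun delta => decide (-3 < delta ∧ delta ≤ -1))
  if steep_losses ≠ [] then "high"
  else if moderate_losses ≠ [] then "medium"
  else "low"

-- ===== PORT B =====
def tradeoff_risk_level_py_alt (delta_by_muscle : List (String × Int)) : String :=
  let worst := PySem.List.minD ((PySem.Dict.ofList delta_by_muscle).values) (fun x => x) 0
  if worst ≤ -3 then "high"
  else if worst ≤ -1 then "medium"
  else "low"

-- ===== PRECONDITION & SPEC =====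
def Spec_tradeoff_risk_level_py (delta_by_muscle : List (String × Int)) (out : String) : Prop := out = tradeoff_risk_level_py_alt delta_by_muscle
instance (delta_by_muscle : List (String × Int)) (out : String) : Decidable (Spec_tradeoff_risk_level_py delta_by_muscle out) := by unfold Spec_tradeoff_risk_level_py; infer_instance

-- ===== CLAIM (what is proved, stated in full; the proofs are below) =====
def Claim_equal_tradeoff_risk_level_py : Prop := ∀ (delta_by_muscle : List (String × Int)), Dom_tradeoff_risk_level_py delta_by_muscle → Spec_tradeoff_risk_level_py delta_by_muscle (tradeoff_risk_level_py delta_by_muscle)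

-- ===== LEMMAS AND PROOFS =====

lemma classify_eq (l : List Int) :
    (if l.filter (fun delta => decide (delta ≤ -3)) ≠ [] then "high"
     else if l.filter (fun delta => decide (-3 < delta ∧ delta ≤ -1)) ≠ [] then "medium"
     else "low")
    = (if PySem.List.minD l (fun x => x) 0 ≤ -3 then "high"
       else if PySem.List.minD l (fun x => x) 0 ≤ -1 then "medium"
       else "low") := by
  rcases eq_or_ne l [] with rfl | hne
  · simp [PySem.List.minD_nil]
  · have hmem := PySem.List.minD_mem l (fun x => x) 0 hne
    set m := PySem.List.minD l (fun x => x) 0 with hm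
    have hmin : ∀ y ∈ l, m ≤ y := fun y hy => PySem.List.minD_id_le l 0 y hy
    have hsteep : (l.filter (fun delta => decide (delta ≤ -3)) ≠ []) ↔ m ≤ -3 := by
      constructor
      · intro h
        rcases List.exists_mem_of_ne_nil _ h with ⟨x, hx⟩
        have := List.of_mem_filter hx
        have hx' : x ≤ -3 := by simpa using this
        exact le_trans (hmin x (List.mem_of_mem_filter hx)) hx'
      · intro h
        have : m ∈ l.filter (fun delta => decide (delta ≤ -3)) :=
          List.mem_filter.2 ⟨hmem, by simpa using h⟩
        exact List.ne_nil_of_mem this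
    have hmod : ¬ m ≤ -3 → ((l.filter (fun delta => decide (-3 < delta ∧ delta ≤ -1)) ≠ []) ↔ m ≤ -1) := by
      intro h3
      constructor
      · intro h
        rcases List.exists_mem_of_ne_nil _ h with ⟨x, hx⟩
        have hx' : -3 < x ∧ x ≤ -1 := by simpa using List.of_mem_filter hx
        exact le_trans (hmin x (List.mem_of_mem_filter hx)) hx'.2
      · intro h
        have : m ∈ l.filter (fun delta => decide (-3 < delta ∧ delta ≤ -1)) :=
          List.mem_filter.2 ⟨hmem, by simp; omega⟩
        exact List.ne_nil_of_mem this
    by_cases h3 : m ≤ -3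
    · rw [if_pos (hsteep.2 h3), if_pos h3]
    · have h3' : ¬ l.filter (fun delta => decide (delta ≤ -3)) ≠ [] :=
        fun hc => h3 (hsteep.1 hc)
      by_cases h1 : m ≤ -1
      · rw [if_neg h3', if_pos ((hmod h3).2 h1), if_neg h3, if_pos h1]
      · have h1' : ¬ l.filter (fun delta => decide (-3 < delta ∧ delta ≤ -1)) ≠ [] :=
          fun hc => h1 ((hmod h3).1 hc)
        rw [if_neg h3', if_neg h1', if_neg h3, if_neg h1]

-- ===== VERDICT (by name: the statement is the Claim_ definition above) =====
theorem tradeoff_risk_level_py_spec : Claim_equal_tradeoff_risk_level_py := by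
  intro d _
  unfold Spec_tradeoff_risk_level_py tradeoff_risk_level_py tradeoff_risk_level_py_alt
  exact classify_eq _
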